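-- pv_equiv track=rewrite | github.com/mikewyer/aoc2021 | 2020/06.py | count_common
-- ===== SOURCE A (Python) =====
-- from typing import List, Iterable, MutableSet
--
-- def char_set(word: str) -> MutableSet[str]:
--     chars: MutableSet[str] = set()
--     for char in word:
--         chars.add(char)
--     return chars
--
-- def count_common(group: List[str]) -> int:
--     all_chars = char_set(group[0])
--     for line in group[1:]:
--         these_chars = char_set(line)
--         all_chars &= these_chars
--         if len(all_chars) == 0:
--             return 0
--     return len(all_chars)
-- ===== SOURCE B (Python) =====
-- def count_common(group):
--     n = len(group)
--     counts = {}
--     for line in group: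
--         for c in set(line):
--             counts[c] = counts.get(c, 0) + 1
--     return sum(1 for c in set(group[0]) if counts.get(c, 0) == n)
-- ===== Notes on version B (the rewrite author's own statement) =====
-- stated objective: alternative
-- what changed: Replaces progressive set intersection with early exit by a single dict tally counting each character once per line, then counts characters of the first line's set whose tally equals the number of lines.
import Mathlib
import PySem

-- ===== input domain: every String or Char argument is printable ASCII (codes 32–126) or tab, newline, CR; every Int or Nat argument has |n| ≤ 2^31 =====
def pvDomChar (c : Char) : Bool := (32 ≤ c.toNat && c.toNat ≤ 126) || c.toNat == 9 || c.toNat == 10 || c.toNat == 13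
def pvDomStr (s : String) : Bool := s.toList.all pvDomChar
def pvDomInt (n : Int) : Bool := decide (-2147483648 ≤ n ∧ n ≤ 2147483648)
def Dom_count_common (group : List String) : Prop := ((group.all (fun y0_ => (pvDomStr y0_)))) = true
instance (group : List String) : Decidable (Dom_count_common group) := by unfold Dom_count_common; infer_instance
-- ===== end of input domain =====

-- B replaces A's progressive set intersection by a single frequency table over all lines
-- (each character counted once per line), then counts the characters of the first line's
-- set whose tally equals the number of lines (objective: alternative one-pass tally).


-- ===== PORT A =====
-- char_set(word): chars = set(); for char in word: chars.add(char); return chars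
def charSet (word : String) : PySem.Set Char :=
  word.toList.foldl PySem.Set.add PySem.Set.empty

-- the 'for line in group[1:]' loop, with the early 'return 0'
def ccLoop (allChars : PySem.Set Char) (lines : List String) : Int :=
  match lines with
  | [] => PySem.Set.len allChars
  | line :: rest =>
      let theseChars := charSet line
      let allChars' := PySem.Set.inter allChars theseChars
      if PySem.Set.len allChars' = 0 then 0 else ccLoop allChars' rest

def count_common (group : List String) : Int :=
  match PySem.List.pyGet? group 0 with   -- group[0]: IndexError on [] (excluded by Pre_)
  | none => 0
  | some first => ccLoop (charSet first) (PySem.List.slice group (some 1) none)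

-- ===== PORT B =====
def count_common_alt (group : List String) : Int :=
  let n : Int := group.length
  let counts : PySem.Dict Char Int :=
    group.foldl (fun d line =>
      (PySem.Set.ofList line.toList).foldl (fun d c => d.insert c (d.getD c 0 + 1)) d)
      PySem.Dict.empty
  match PySem.List.pyGet? group 0 with   -- set(group[0]): IndexError on [] (excluded by Pre_)
  | none => 0
  | some first =>
      ((PySem.Set.ofList first.toList).countP (fun c => counts.getD c 0 == n) : Int)

-- ===== PRECONDITION & SPEC =====
-- A (and B) raise IndexError on the empty group (group[0]); that is the only exception.
def Pre_count_common (group : List String) : Prop := group ≠ []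
instance (group : List String) : Decidable (Pre_count_common group) := by unfold Pre_count_common; infer_instance
def pvWitness_count_common : List String := ["abc", "bcd"]

def Spec_count_common (group : List String) (out : Int) : Prop := out = count_common_alt group
instance (group : List String) (out : Int) : Decidable (Spec_count_common group out) := by unfold Spec_count_common; infer_instance

-- ===== CLAIM (what is proved, stated in full; the proofs are below) =====
def Claim_equal_count_common : Prop := ∀ (group : List String), Dom_count_common group → Pre_count_common group → Spec_count_common group (count_common group)

-- ===== LEMMAS AND PROOFS =====

-- char_set builds exactly set(word)
theorem charSet_eq (w : String) : charSet w = PySem.Set.ofList w.toList := by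
  rw [PySem.Set.ofList_eq_foldl]; rfl

-- the tally: after processing all lines, counts[c] = number of lines whose char set contains c
theorem counts_getD (lines : List String) (d : PySem.Dict Char Int) (c : Char) :
    (lines.foldl (fun d line =>
        (PySem.Set.ofList line.toList).foldl (fun d c => d.insert c (d.getD c 0 + 1)) d) d).getD c 0
      = d.getD c 0 + (lines.countP (fun l => decide (c ∈ l.toList)) : Int) := by
  induction lines generalizing d with
  | nil => simp
  | cons line rest ih =>
      rw [List.foldl_cons, ih, PySem.Dict.getD_foldl_insert_add_one, List.countP_cons]
      have hcnt : (PySem.Set.ofList line.toList).count c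
          = if c ∈ line.toList then 1 else 0 := by
        rw [List.Nodup.count (PySem.Set.nodup_ofList _)]
        simp [PySem.Set.mem_ofList]
      rw [hcnt]
      by_cases h : c ∈ line.toList <;> simp [h] <;> try ring

-- A's loop computes the size of the filter of the running set by "in every remaining line"
theorem ccLoop_eq (lines : List String) (s : PySem.Set Char) :
    ccLoop s lines = (s.countP (fun c => decide (∀ l ∈ lines, c ∈ l.toList)) : Int) := by
  induction lines generalizing s with
  | nil => simp [ccLoop, PySem.Set.len, List.countP_true]
  | cons line rest ih =>
      rw [ccLoop]
      have hinter : PySem.Set.inter s (charSet line)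
          = s.filter (fun c => decide (c ∈ line.toList)) := by
        rw [charSet_eq]
        simp only [PySem.Set.inter]
        apply List.filter_congr
        intro c _
        simp [PySem.Set.contains_eq_listContains, PySem.Set.mem_ofList]
      simp only [hinter]
      by_cases hz : PySem.Set.len (s.filter (fun c => decide (c ∈ line.toList))) = 0
      · simp only [hz, if_true]
        have hnil : s.filter (fun c => decide (c ∈ line.toList)) = [] := by
          have := hz
          simp only [PySem.Set.len] at this
          exact_mod_cast List.length_eq_zero_iff.mp (by exact_mod_cast this)
        have h0 : s.countP (fun c => decide (c ∈ line.toList) && decide (∀ a ∈ rest, c ∈ a.toList)) = 0 := by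
          rw [List.countP_eq_zero]
          intro c hc
          have hcl : c ∉ line.toList := by
            intro hmem
            have : c ∈ s.filter (fun c => decide (c ∈ line.toList)) :=
              List.mem_filter.mpr ⟨hc, by simpa using hmem⟩
            simp [hnil] at this
          simp [hcl]
        simp only [List.forall_mem_cons, Bool.decide_and]
        simp [h0]
      · simp only [hz, if_false]
        rw [ih, List.countP_filter]
        congr 1
        apply List.countP_congr
        intro c _
        simp [and_comm]

theorem count_common_spec_aux (first : String) (rest : List String) :
    count_common (first :: rest) = count_common_alt (first :: rest) := by
  have hget : PySem.List.pyGet? (first :: rest) 0 = some first := by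
    simp [PySem.List.pyGet?, PySem.List.pyIdx?]
  have hslice : PySem.List.slice (first :: rest) (some 1) none = rest := by
    simp [PySem.List.slice_from]
  rw [count_common, count_common_alt]
  simp only [hget, hslice, charSet_eq, ccLoop_eq]
  congr 1
  apply List.countP_congr
  intro c hc
  have hcf : c ∈ first.toList := (PySem.Set.mem_ofList _ _).mp hc
  rw [counts_getD]
  simp only [PySem.Dict.getD_empty, zero_add, beq_iff_eq]
  have : ((first :: rest).countP (fun l => decide (c ∈ l.toList)) : Int)
        = ((first :: rest).length : Int)
      ↔ (first :: rest).countP (fun l => decide (c ∈ l.toList)) = (first :: rest).length := by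
    exact_mod_cast Iff.rfl
  rw [this, List.countP_eq_length]
  simp only [decide_eq_true_iff]
  constructor
  · intro h l hl
    rcases List.mem_cons.mp hl with rfl | hl
    · simpa using hcf
    · simpa using h l hl
  · intro h l hl
    exact h l (List.mem_cons_of_mem _ hl)

-- ===== VERDICT (by name: the statement is the Claim_ definition above) =====
theorem count_common_spec : Claim_equal_count_common := by
  intro group _ hpre
  unfold Spec_count_common
  match group with
  | [] => exact absurd rfl hpre
  | first :: rest => exact count_common_spec_aux first rest
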